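-- pv_equiv track=rewrite | github.com/mhenrysson/AdventOfCode2021 | Twentyfirst/main.py | player_sums
-- ===== SOURCE A (Python) =====
-- def player_sums(start, sums):
--     ps = [start]
--     for s in sums:
--         a = (ps[-1] + s - 1) % 10 + 1
--         ps.append(a)
--     ps = ps[1:]
--     for i in range(1, len(ps)):
--         ps[i] += ps[i - 1]
--     return ps
-- ===== SOURCE B (Python) =====
-- def player_sums(start, sums):
--     pos = start
--     total = 0
--     result = []
--     for s in sums:
--         pos = (pos + s - 1) % 10 + 1
--         total += pos
--         result.append(total)
--     return result
-- ===== Notes on version B (the rewrite author's own statement) =====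
-- stated objective: simpler
-- what changed: Fuses A's three passes (build positions list via ps[-1], drop the start element, in-place prefix-sum loop) into one loop over sums carrying two scalars pos and total and appending totals directly.
import Mathlib
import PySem

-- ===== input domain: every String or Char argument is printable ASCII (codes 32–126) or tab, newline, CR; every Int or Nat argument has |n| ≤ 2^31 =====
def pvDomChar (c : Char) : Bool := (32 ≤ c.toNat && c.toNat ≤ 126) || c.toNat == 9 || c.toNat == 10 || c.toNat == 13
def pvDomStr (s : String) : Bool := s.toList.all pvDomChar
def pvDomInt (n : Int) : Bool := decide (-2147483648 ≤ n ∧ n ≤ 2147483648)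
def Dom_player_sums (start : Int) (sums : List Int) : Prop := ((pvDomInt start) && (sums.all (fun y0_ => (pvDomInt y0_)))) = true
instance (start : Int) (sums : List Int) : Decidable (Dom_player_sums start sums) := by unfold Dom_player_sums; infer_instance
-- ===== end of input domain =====

-- B fuses A's three passes (build positions via ps[-1], drop start, in-place prefix-sum loop)
-- into one loop carrying two scalars; objective: simpler.

-- ===== PORT A =====
-- the in-place loop 'for i in range(1, len(ps)): ps[i] += ps[i-1]' ported as a carry recursion:
-- each element becomes element + already-updated predecessor (prev), exactly the Python update.
def aPrefix (prev : Int) : List Int → List Int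
  | [] => []
  | x :: xs => (x + prev) :: aPrefix (x + prev) xs

def player_sums (start : Int) (sums : List Int) : List Int :=
  let ps := sums.foldl (fun ps s => ps ++ [PySem.Int.mod (ps.getLast! + s - 1) 10 + 1]) [start]
  let ps := PySem.List.slice ps (some 1) none   -- ps[1:]
  match ps with
  | [] => []
  | h :: t => h :: aPrefix h t           -- ps[0] unchanged, loop starts at i = 1

-- ===== PORT B =====
def player_sums_alt (start : Int) (sums : List Int) : List Int :=
  (sums.foldl
    (fun (st : Int × Int × List Int) s =>
      let pos := PySem.Int.mod (st.1 + s - 1) 10 + 1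
      let total := st.2.1 + pos
      (pos, total, st.2.2 ++ [total]))
    (start, 0, [])).2.2

-- ===== PRECONDITION & SPEC =====
def Spec_player_sums (start : Int) (sums : List Int) (out : List Int) : Prop := out = player_sums_alt start sums
instance (start : Int) (sums : List Int) (out : List Int) : Decidable (Spec_player_sums start sums out) := by unfold Spec_player_sums; infer_instance

-- ===== CLAIM (what is proved, stated in full; the proofs are below) =====
def Claim_equal_player_sums : Prop := ∀ (start : Int) (sums : List Int), Dom_player_sums start sums → Spec_player_sums start sums (player_sums start sums)

-- ===== LEMMAS AND PROOFS =====

-- reference recursion: running totals with given pos and total accumulators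
def refSums (pos total : Int) : List Int → List Int
  | [] => []
  | s :: rest =>
      let p := PySem.Int.mod (pos + s - 1) 10 + 1
      (total + p) :: refSums p (total + p) rest

-- positions sequence generated from pos
def gPos (pos : Int) : List Int → List Int
  | [] => []
  | s :: rest =>
      let p := PySem.Int.mod (pos + s - 1) 10 + 1
      p :: gPos p rest

theorem foldl_ps_eq (sums : List Int) : ∀ (ps : List Int), ps ≠ [] →
    sums.foldl (fun ps s => ps ++ [PySem.Int.mod (ps.getLast! + s - 1) 10 + 1]) ps
      = ps ++ gPos ps.getLast! sums := by
  induction sums with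
  | nil => intro ps _; simp [gPos]
  | cons s rest ih =>
      intro ps hps
      simp only [List.foldl_cons]
      rw [ih (ps ++ [PySem.Int.mod (ps.getLast! + s - 1) 10 + 1]) (by simp)]
      have hg : (ps ++ [PySem.Int.mod (ps.getLast! + s - 1) 10 + 1]).getLast! = PySem.Int.mod (ps.getLast! + s - 1) 10 + 1 := by
        simp [List.getLast!_eq_getLast?_getD]
      rw [hg]
      simp [gPos, List.append_assoc]

theorem aPrefix_gPos (sums : List Int) : ∀ (pos total : Int),
    aPrefix total (gPos pos sums) = refSums pos total sums := by
  induction sums with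
  | nil => intro pos total; simp [gPos, aPrefix, refSums]
  | cons s rest ih =>
      intro pos total
      simp only [gPos, aPrefix, refSums]
      rw [Int.add_comm]
      exact congrArg _ (ih _ _)

theorem player_sums_eq_ref (start : Int) (sums : List Int) :
    player_sums start sums = refSums start 0 sums := by
  unfold player_sums
  rw [foldl_ps_eq sums [start] (by simp)]
  have hlast : ([start] : List Int).getLast! = start := by
    simp [List.getLast!_eq_getLast?_getD]
  rw [hlast]
  have hsl : PySem.List.slice ([start] ++ gPos start sums) (some 1) none = gPos start sums := by
    rw [PySem.List.slice_from_one]; rfl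
  simp only [hsl]
  cases h : gPos start sums with
  | nil =>
      cases sums with
      | nil => simp [refSums]
      | cons s rest => simp [gPos] at h
  | cons p t =>
      have := aPrefix_gPos sums start 0
      rw [h] at this
      simp only [aPrefix] at this
      simpa using this

theorem foldl_alt_eq (sums : List Int) : ∀ (pos total : Int) (acc : List Int),
    (sums.foldl
      (fun (st : Int × Int × List Int) s =>
        let p := PySem.Int.mod (st.1 + s - 1) 10 + 1
        let t := st.2.1 + p
        (p, t, st.2.2 ++ [t]))
      (pos, total, acc)).2.2 = acc ++ refSums pos total sums := by
  induction sums with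
  | nil => intro pos total acc; simp [refSums]
  | cons s rest ih =>
      intro pos total acc
      simp only [List.foldl_cons, refSums]
      rw [ih]
      simp [List.append_assoc]

-- ===== VERDICT (by name: the statement is the Claim_ definition above) =====
theorem player_sums_spec : Claim_equal_player_sums := by
  intro start sums _
  unfold Spec_player_sums player_sums_alt
  rw [foldl_alt_eq, player_sums_eq_ref]
  simp
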